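-- pv_equiv track=rewrite | github.com/nicolaseschneider/algo_practice | bloomberg/1dCandyCrush/candyCrush.py | crush_candy
-- ===== SOURCE A (Python) =====
-- class CrushStack():
--   def __init__(self):
--     self.list = []
--
--   def not_empty(self):
--     return len(self.list) > 0
--
--   def peek(self):
--     return self.list[-1]
--
--   def pop(self):
--     return self.list.pop();
--
--   def push(self, thing):
--     self.list.append(thing)
--     return self.list
--
--   def match_char(self, character):
--     if self.not_empty():
--       last = self.peek()
--       if character == last["ch"]:
--         return True
--       else:
--         return False
--     else:
--       return False
--
--   def add_to_last(self):
--     if self.not_empty():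
--       last = self.pop()
--       self.push({ "ch": last["ch"], "count": last["count"] + 1 })
--
-- def crush_candy(board):
--   stack = CrushStack()
--   for char in board:
--     if stack.not_empty():
--       top = stack.peek()
--       if stack.match_char(char):
--         stack.add_to_last()
--       elif top["count"] > 2:
--         stack.pop()
--         if stack.match_char(char):
--           stack.add_to_last()
--         else:
--           stack.push({ "ch": char, "count": 1 })
--       else:
--         stack.push({ "ch": char, "count": 1 })
--     else:
--       stack.push({ "ch": char, "count": 1 })
--   if stack.peek()["count"] > 2:
--     stack.pop()
--
--   return ''.join([char["ch"] * char["count"] for char in stack.list])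
-- ===== SOURCE B (Python) =====
-- def _remove_first_run(ts):
--     # first maximal run of >=3 equal tokens removed, or None if no such run
--     i = 0
--     while i + 2 < len(ts):
--         if ts[i] == ts[i + 1] == ts[i + 2]:
--             j = i + 3
--             while j < len(ts) and ts[j] == ts[i]:
--                 j += 1
--             return ts[:i] + ts[j:]
--         i += 1
--     return None
--
-- def crush_candy(board):
--     tokens = list(board)
--     while True:
--         nxt = _remove_first_run(tokens)
--         if nxt is None:
--             return ''.join(tokens)
--         tokens = nxt
-- ===== Notes on version B (the rewrite author's own statement) =====
-- stated objective: alternative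
-- what changed: A makes a single left-to-right pass maintaining a stack of (char,count) runs with lazy pops; B repeatedly scans the token list for the first run of >=3 equal chars, deletes it, and loops to a fixpoint.
import Mathlib
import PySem

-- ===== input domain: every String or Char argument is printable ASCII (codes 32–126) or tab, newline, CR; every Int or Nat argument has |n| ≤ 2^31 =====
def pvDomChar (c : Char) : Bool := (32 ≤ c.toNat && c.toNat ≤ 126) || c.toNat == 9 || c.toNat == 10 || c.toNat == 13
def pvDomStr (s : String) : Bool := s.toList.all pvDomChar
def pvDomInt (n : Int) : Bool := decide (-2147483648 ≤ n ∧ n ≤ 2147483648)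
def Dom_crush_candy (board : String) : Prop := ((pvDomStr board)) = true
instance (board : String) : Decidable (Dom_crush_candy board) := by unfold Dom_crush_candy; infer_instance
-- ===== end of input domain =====

-- B replaces A's one-pass stack of (char,count) runs by a plain fixpoint loop (delete the first
-- run of ≥3 equal chars, repeat until none remains): an alternative, not faster, decomposition.

-- ===== PORT A =====
-- A's stack (Python list, top at the end) is a List (Char × Nat) with the top at the HEAD;
-- one loop iteration (all CrushStack method calls inlined, branches in A's order):
def stepA (st : List (Char × Nat)) (c : Char) : List (Char × Nat) :=
  match st with
  | [] => [(c, 1)]                                   -- else: stack.push({ch:char, count:1})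
  | (ch, cnt) :: rest =>                             -- top = stack.peek()
    if c = ch then (ch, cnt + 1) :: rest             -- match_char → add_to_last
    else if cnt > 2 then                             -- elif top["count"] > 2: stack.pop()
      match rest with
      | (ch2, cnt2) :: rest2 =>
          if c = ch2 then (ch2, cnt2 + 1) :: rest2   -- match_char → add_to_last
          else (c, 1) :: rest                        -- else push
      | [] => [(c, 1)]                               -- match_char false on empty → push
    else (c, 1) :: (ch, cnt) :: rest                 -- else push

-- final 'if stack.peek()["count"] > 2: stack.pop()'; the [] case is Python's IndexError (outside Pre_)
def csFinal (st : List (Char × Nat)) : List (Char × Nat) :=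
  match st with
  | (ch, cnt) :: rest => if cnt > 2 then rest else (ch, cnt) :: rest
  | [] => []

-- ''.join(ch*count for … in stack.list): bottom→top, so reverse our top-at-head list
def csRender (st : List (Char × Nat)) : List Char :=
  ((st.reverse).map (fun p => List.replicate p.2 p.1)).flatten

def crush_candy (board : String) : String :=
  String.mk (csRender (csFinal (board.toList.foldl stepA [])))

-- ===== PORT B =====
-- tokens[j:] after extending the run: drop the leading tokens equal to c
def dropRun (c : Char) : List Char → List Char
  | [] => []
  | x :: xs => if x = c then dropRun c xs else x :: xs

-- _remove_first_run: scan left to right for a triple, extend it maximally, delete it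
def removeFirstRun : List Char → Option (List Char)
  | c1 :: c2 :: c3 :: r =>
      if c1 = c2 ∧ c2 = c3 then some (dropRun c1 r)
      else (removeFirstRun (c2 :: c3 :: r)).map (c1 :: ·)
  | _ => none

theorem dropRun_length_le (c : Char) : ∀ l : List Char, (dropRun c l).length ≤ l.length := by
  intro l

  induction l with
  | nil => simp [dropRun]
  | cons x xs ih =>
      simp only [dropRun]
      split
      · exact Nat.le_succ_of_le ih
      · simp

theorem removeFirstRun_length_lt :
    ∀ (l l' : List Char), removeFirstRun l = some l' → l'.length < l.length := by
  intro l
  induction l with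
  | nil => intro l' h; simp [removeFirstRun] at h
  | cons c1 rest ih =>
      match rest with
      | [] => intro l' h; simp [removeFirstRun] at h
      | [c2] => intro l' h; simp [removeFirstRun] at h
      | c2 :: c3 :: r =>
          intro l' h
          simp only [removeFirstRun] at h
          split at h
          · cases h
            have := dropRun_length_le c1 r
            simp; omega
          · rcases Option.map_eq_some_iff.mp h with ⟨r', hr', rfl⟩
            have := ih r' hr'
            simpa using Nat.succ_lt_succ this

-- the while-True loop of crush_candy in Source B
def crushLoop (ts : List Char) : List Char :=
  match h : removeFirstRun ts with
  | some ts' => crushLoop ts'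
  | none => ts
termination_by ts.length
decreasing_by exact removeFirstRun_length_lt _ _ h

def crush_candy_alt (board : String) : String :=
  String.mk (crushLoop board.toList)

-- ===== PRECONDITION & SPEC =====
-- Pre_ excludes only the empty board, on which A raises IndexError from stack.peek().
def Pre_crush_candy (board : String) : Prop := board ≠ ""
instance (board : String) : Decidable (Pre_crush_candy board) := by unfold Pre_crush_candy; infer_instance
def pvWitness_crush_candy : String := "aabbba"

def Spec_crush_candy (board : String) (out : String) : Prop := out = crush_candy_alt board
instance (board : String) (out : String) : Decidable (Spec_crush_candy board out) := by unfold Spec_crush_candy; infer_instance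

-- ===== CLAIM (what is proved, stated in full; the proofs are below) =====
def Claim_equal_crush_candy : Prop := ∀ (board : String), Dom_crush_candy board → Pre_crush_candy board → Spec_crush_candy board (crush_candy board)

-- ===== LEMMAS AND PROOFS =====

def noTriple : List Char → Prop
  | a :: b :: c :: r => ¬(a = b ∧ b = c) ∧ noTriple (b :: c :: r)
  | _ => True

theorem noTriple_prefix : ∀ (u s : List Char), noTriple (u ++ s) → noTriple u := by
  intro u
  induction u with
  | nil => intro _ _; trivial
  | cons a t ih =>
      intro s h
      match t, h with
      | [], _ => trivial
      | [_], _ => trivial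
      | b :: c :: r, h =>
          obtain ⟨h1, h2⟩ := h
          exact ⟨h1, ih s h2⟩

theorem noTriple_no_end3 : ∀ (w : List Char) (a : Char), ¬ noTriple (w ++ [a, a, a]) := by
  intro w
  induction w with
  | nil => intro a h; exact h.1 ⟨rfl, rfl⟩
  | cons x t ih =>
      intro a h
      match t, h with
      | [], h => exact h.2.1 ⟨rfl, rfl⟩
      | [y], h => exact h.2.2.1 ⟨rfl, rfl⟩
      | y :: z :: r, h => exact ih a h.2

theorem csRender_cons (ch : Char) (k : Nat) (r : List (Char × Nat)) :
    csRender ((ch, k) :: r) = csRender r ++ List.replicate k ch := by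
  simp [csRender]

-- MASTER invariant of A's fold on a triple-free word: counts 1..2 and the stack renders the word
theorem masterA : ∀ (u : List Char), noTriple u →
    (∀ p ∈ u.foldl stepA ([] : List (Char × Nat)), 1 ≤ p.2 ∧ p.2 ≤ 2) ∧
      csRender (u.foldl stepA []) = u := by
  intro u
  induction u using List.reverseRecOn with
  | nil => intro _; exact ⟨by simp, by simp [csRender]⟩
  | append_singleton u c ih =>
      intro h
      have hu : noTriple u := noTriple_prefix u [c] h
      obtain ⟨hcnt, hrend⟩ := ih hu
      rw [List.foldl_append]
      set st := u.foldl stepA ([] : List (Char × Nat)) with hst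
      match hstm : st with
      | [] =>
          have hu0 : u = [] := by simpa [csRender] using hrend.symm
          subst hu0
          refine ⟨by simp [stepA], by simp [stepA, csRender]⟩
      | (ch, k) :: r =>
          have hk := hcnt (ch, k) (by simp)
          by_cases hc : c = ch
          · subst hc
            have hk1 : k = 1 := by
              rcases Nat.lt_or_ge k 2 with h2 | h2
              · omega
              · exfalso
                have hk2 : k = 2 := by omega
                subst hk2
                rw [csRender_cons] at hrend
                have : u ++ [c] = csRender r ++ [c, c, c] := by
                  rw [← hrend]; simp [List.replicate]
                rw [this] at h
                exact noTriple_no_end3 (csRender r) c h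
            subst hk1
            constructor
            · intro p hp
              simp [stepA] at hp
              rcases hp with rfl | hp
              · omega
              · exact hcnt p (by simp [hp])
            · have hstep : List.foldl stepA ((c, 1) :: r) [c] = (c, 2) :: r := by
                simp [stepA]
              rw [hstep, csRender_cons]
              rw [csRender_cons] at hrend
              rw [← hrend]
              simp [List.replicate]
          · have hknot : ¬ k > 2 := by omega
            constructor
            · intro p hp
              simp [stepA, hc, hknot] at hp
              rcases hp with rfl | rfl | hp
              · omega
              · omega
              · exact hcnt p (by simp [hp])
            · simp only [List.foldl_cons, List.foldl_nil, stepA, if_neg hc, if_neg hknot]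
              rw [csRender_cons, csRender_cons]
              rw [csRender_cons] at hrend
              rw [hrend]
              simp [List.replicate]

theorem getLast?_render_cons (ch : Char) (k : Nat) (r : List (Char × Nat)) (hk : 1 ≤ k) :
    (csRender ((ch, k) :: r)).getLast? = some ch := by
  rw [csRender_cons]
  match k, hk with
  | Nat.succ m, _ =>
      rw [List.getLast?_append_of_ne_nil]
      · rw [List.getLast?_eq_some_iff]
        exact ⟨List.replicate m ch, by simp [List.replicate_succ']⟩
      · simp [List.replicate_succ]

-- merging a run of the same char onto a top with that char
theorem mergeRun (c : Char) : ∀ (m j : Nat) (st : List (Char × Nat)),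
    (List.replicate m c).foldl stepA ((c, j) :: st) = (c, j + m) :: st := by
  intro m
  induction m with
  | zero => intro j st; simp
  | succ n ih =>
      intro j st
      rw [List.replicate_succ]
      simp only [List.foldl_cons]
      have : stepA ((c, j) :: st) c = (c, j + 1) :: st := by simp [stepA]
      rw [this, ih]
      have he : j + 1 + n = j + (n + 1) := by omega
      rw [he]

-- pushing a fresh run of c on a clean stack whose top char is not c
theorem pushRun (c : Char) (k : Nat) (hk : 1 ≤ k) (st : List (Char × Nat))
    (hcnt : ∀ p ∈ st, 1 ≤ p.2 ∧ p.2 ≤ 2)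
    (htop : ∀ ch k', st.head? = some (ch, k') → ch ≠ c) :
    (List.replicate k c).foldl stepA st = (c, k) :: st := by
  match k, hk with
  | Nat.succ m, _ =>
      rw [List.replicate_succ]
      simp only [List.foldl_cons]
      have hstep : stepA st c = (c, 1) :: st := by
        match st with
        | [] => simp [stepA]
        | (ch, cnt) :: r =>
            have hne : c ≠ ch := fun h => htop ch cnt rfl h.symm
            have h2 : ¬ cnt > 2 := by have := hcnt (ch, cnt) (by simp); omega
            simp [stepA, hne, h2]
      rw [hstep, mergeRun]
      have he : 1 + m = m + 1 := by omega
      rw [he]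

-- after a crushed run (count > 2) is on top, the next different char behaves as if the run were gone
theorem stepSkip (c d : Char) (k : Nat) (hk : k > 2) (hd : d ≠ c) (st : List (Char × Nat))
    (hcnt : ∀ p ∈ st, 1 ≤ p.2 ∧ p.2 ≤ 2) :
    stepA ((c, k) :: st) d = stepA st d := by
  match st with
  | [] => simp [stepA, hd, hk]
  | (ch, cnt) :: r =>
      by_cases hdc : d = ch
      · subst hdc
        simp [stepA, hd, hk]
      · have h2 : ¬ cnt > 2 := by have := hcnt (ch, cnt) (by simp); omega
        simp [stepA, hd, hk, hdc, h2]

theorem dropRun_spec (c : Char) : ∀ (r : List Char),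
    ∃ t, r = List.replicate t c ++ dropRun c r ∧ ∀ d, (dropRun c r).head? = some d → d ≠ c := by
  intro r
  induction r with
  | nil => exact ⟨0, by simp [dropRun]⟩
  | cons x xs ih =>
      by_cases hx : x = c
      · subst hx
        obtain ⟨t, h1, h2⟩ := ih
        refine ⟨t + 1, ?_, ?_⟩
        · simp [dropRun, List.replicate_succ]
          exact h1
        · simpa [dropRun] using h2
      · refine ⟨0, by simp [dropRun, hx], ?_⟩
        intro d hd
        simp [dropRun, hx] at hd
        subst hd
        exact hx

-- decomposition of the first removed run
theorem removeFirstRun_decomp : ∀ (l l' : List Char), removeFirstRun l = some l' →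
    ∃ (u v : List Char) (c : Char) (k : Nat),
      l = u ++ List.replicate k c ++ v ∧ l' = u ++ v ∧ 3 ≤ k ∧ noTriple u ∧
      u.getLast? ≠ some c ∧ (∀ d, v.head? = some d → d ≠ c) := by
  intro l
  induction l with
  | nil => intro l' h; simp [removeFirstRun] at h
  | cons c1 rest ih =>
      match rest with
      | [] => intro l' h; simp [removeFirstRun] at h
      | [c2] => intro l' h; simp [removeFirstRun] at h
      | c2 :: c3 :: r =>
          intro l' h
          simp only [removeFirstRun] at h
          split at h
          · rename_i htr
            obtain ⟨rfl, rfl⟩ := htr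
            cases h
            obtain ⟨t, h1, h2⟩ := dropRun_spec c1 r
            refine ⟨[], dropRun c1 r, c1, t + 3, ?_, by simp, by omega, trivial, by simp, h2⟩
            simp only [List.nil_append]
            rw [show t + 3 = 3 + t by omega]
            rw [List.replicate_add]
            simp [List.replicate]
            exact h1
          · rename_i htr
            rcases Option.map_eq_some_iff.mp h with ⟨r', hr', rfl⟩
            obtain ⟨u, v, c, k, hdec, hl', hk, hnt, hlast, hv⟩ := ih r' hr'
            refine ⟨c1 :: u, v, c, k, by simp [hdec], by simp [hl'], hk, ?_, ?_, hv⟩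
            · -- noTriple (c1 :: u)
              match u, hnt with
              | [], _ => trivial
              | [u0], _ => trivial
              | u0 :: u1 :: w, hnt =>
                  refine ⟨?_, hnt⟩
                  rintro ⟨e1, e2⟩
                  have hd2 : c2 :: c3 :: r = u0 :: u1 :: (w ++ (List.replicate k c ++ v)) := by
                    simpa [List.append_assoc] using hdec
                  injection hd2 with h1 hd3
                  injection hd3 with h2 _
                  exact htr ⟨e1.trans h1.symm, (h1.trans e2).trans h2.symm⟩
            · -- getLast? (c1 :: u) ≠ some c
              match u with
              | [] =>
                  -- rest = replicate k c ++ v with k ≥ 3, so c2 = c3 = c; guard gives c1 ≠ c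
                  have hc2 : c2 = c ∧ c3 = c := by
                    have := hdec
                    match k, hk with
                    | Nat.succ (Nat.succ (Nat.succ m)), _ =>
                        simp [List.replicate] at this
                        exact ⟨this.1, this.2.1⟩
                  intro hcon
                  simp at hcon
                  exact htr ⟨hcon.trans hc2.1.symm, hc2.1.trans hc2.2.symm⟩
              | u0 :: w =>
                  simpa using hlast

theorem noTriple_of_rfr_none : ∀ (l : List Char), removeFirstRun l = none → noTriple l := by
  intro l
  induction l with
  | nil => intro _; trivial
  | cons c1 rest ih =>
      match rest with
      | [] => intro _; trivial
      | [c2] => intro _; trivial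
      | c2 :: c3 :: r =>
          intro h
          simp only [removeFirstRun] at h
          split at h
          · cases h
          · rename_i htr
            rw [Option.map_eq_none_iff] at h
            exact ⟨htr, ih h⟩

-- A's result on l with the first run removed is unchanged
theorem skipRun (l l' : List Char) (h : removeFirstRun l = some l') :
    csRender (csFinal (l.foldl stepA [])) = csRender (csFinal (l'.foldl stepA [])) := by
  obtain ⟨u, v, c, k, rfl, rfl, hk, hnt, hlast, hv⟩ := removeFirstRun_decomp l l' h
  obtain ⟨hcnt, hrend⟩ := masterA u hnt
  rw [List.append_assoc, List.foldl_append, List.foldl_append, List.foldl_append]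
  set st := u.foldl stepA ([] : List (Char × Nat)) with hst
  have htopne : ∀ ch k', st.head? = some (ch, k') → ch ≠ c := by
    intro ch k' hh hcc
    match hstm : st, hh with
    | (ch0, k0) :: r, hh =>
        simp only [List.head?_cons, Option.some.injEq, Prod.mk.injEq] at hh
        have h1 := hcnt (ch0, k0) (by simp)
        have h2 := getLast?_render_cons ch0 k0 r h1.1
        rw [hrend] at h2
        apply hlast
        rw [h2, hh.1, hcc]
  have hpush : (List.replicate k c).foldl stepA st = (c, k) :: st :=
    pushRun c k (by omega) st hcnt htopne
  rw [hpush]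
  match v with
  | [] =>
      simp only [List.foldl_nil]
      have h1 : csFinal ((c, k) :: st) = st := by simp [csFinal, show k > 2 by omega]
      rw [h1]
      match hstm : st with
      | [] => rfl
      | (ch0, k0) :: r =>
          have := hcnt (ch0, k0) (by simp)
          simp [csFinal, show ¬ k0 > 2 by omega]
  | d :: v' =>
      have hd : d ≠ c := hv d rfl
      simp only [List.foldl_cons]
      rw [stepSkip c d k (by omega) hd st hcnt]

theorem crushLoop_step (ts ts' : List Char) (h : removeFirstRun ts = some ts') :
    crushLoop ts = crushLoop ts' := by
  conv_lhs => rw [crushLoop.eq_def]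
  split
  · rename_i ts'' h'
    rw [h] at h'
    cases h'
    rfl
  · rename_i h'
    rw [h] at h'
    cases h'

theorem crushLoop_none (ts : List Char) (h : removeFirstRun ts = none) :
    crushLoop ts = ts := by
  conv_lhs => rw [crushLoop.eq_def]
  split
  · rename_i ts'' h'
    rw [h] at h'
    cases h'
  · rfl

theorem mainEq : ∀ (l : List Char), csRender (csFinal (l.foldl stepA [])) = crushLoop l := by
  intro l
  induction l using crushLoop.induct with
  | case1 ts ts' hrm ih =>
      rw [crushLoop_step ts ts' hrm]
      rw [skipRun ts ts' hrm]
      exact ih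
  | case2 ts hrm =>
      rw [crushLoop_none ts hrm]
      have hnt := noTriple_of_rfr_none ts hrm
      obtain ⟨hcnt, hrend⟩ := masterA ts hnt
      match hstm : ts.foldl stepA ([] : List (Char × Nat)), hcnt, hrend with
      | [], _, hrend => simpa [csFinal] using hrend
      | (ch, k) :: r, hcnt, hrend =>
          have hk2 := hcnt (ch, k) (by simp)
          simpa [csFinal, show ¬ k > 2 by omega] using hrend

-- ===== VERDICT (by name: the statement is the Claim_ definition above) =====
theorem crush_candy_spec : Claim_equal_crush_candy := by
  intro board _ _
  unfold Spec_crush_candy crush_candy crush_candy_alt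
  rw [mainEq]
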